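-- pv_equiv track=rewrite | github.com/wankai/flask-geolocation | src/flask_geolocation/ip_database.py | __get_grouped_items
-- ===== SOURCE A (Python) =====
-- def __get_grouped_items(items):
--     grouped_items = []
--     last_index = -1
--     group_single = []
--     for mask, address, code in items:
--         if last_index > -1 and mask != items[last_index][0]:
--             grouped_items.append(group_single.copy())
--             group_single.clear()
--         group_single.append((mask, address, code))
--         last_index = last_index + 1
--
--     if group_single:
--         grouped_items.append(group_single)
--
--     return grouped_items
-- ===== SOURCE B (Python) =====
-- def __get_grouped_items(items):
--     # normalize: validates arity and converts each entry to a tuple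
--     norm = [(mask, address, code) for mask, address, code in items]
--     # pass 1: indices where the mask changes (cut points)
--     cuts = [i for i in range(1, len(norm)) if norm[i][0] != norm[i - 1][0]]
--     # pass 2: slice between consecutive edges
--     edges = [0] + cuts + [len(norm)]
--     return [norm[lo:hi] for lo, hi in zip(edges, edges[1:])] if norm else []
-- ===== Notes on version B (the rewrite author's own statement) =====
-- stated objective: alternative
-- what changed: Replaces A's single running-group pass (mutable group buffer with copy/clear and a last_index back-reference) by two staged passes: first compute the list of indices where the mask changes, then materialize each group by slicing the normalized list between consecutive cut points.
import Mathlib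
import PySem

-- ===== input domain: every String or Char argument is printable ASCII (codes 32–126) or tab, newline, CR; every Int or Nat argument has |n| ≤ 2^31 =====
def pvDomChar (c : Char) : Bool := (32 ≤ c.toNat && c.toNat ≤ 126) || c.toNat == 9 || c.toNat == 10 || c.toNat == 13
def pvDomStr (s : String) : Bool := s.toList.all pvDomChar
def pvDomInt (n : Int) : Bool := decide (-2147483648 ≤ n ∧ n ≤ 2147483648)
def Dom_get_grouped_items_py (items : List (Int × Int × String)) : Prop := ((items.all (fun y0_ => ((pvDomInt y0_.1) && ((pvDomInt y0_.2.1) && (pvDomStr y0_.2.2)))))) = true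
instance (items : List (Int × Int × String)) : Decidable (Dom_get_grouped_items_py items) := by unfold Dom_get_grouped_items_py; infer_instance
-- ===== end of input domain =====

-- B replaces A's single running-group pass (mutable buffer, last_index back-reference) by two
-- staged passes: compute the cut indices where the mask changes, then slice between them.

-- ===== PORT A =====
-- the for-loop of A: state = (grouped_items, last_index, group_single); `orig` is the list
-- `items` that A indexes with items[last_index]
def aLoop (orig : List (Int × Int × String)) :
    List (Int × Int × String) → List (List (Int × Int × String)) → Int →
    List (Int × Int × String) →
    List (List (Int × Int × String)) × List (Int × Int × String)
  | [], grouped, _lastIndex, group => (grouped, group)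
  | (mask, address, code) :: rest, grouped, lastIndex, group =>
    if decide (lastIndex > -1) &&
        ((PySem.List.pyGet? orig lastIndex).elim false (fun t => mask != t.1)) then
      aLoop orig rest (grouped ++ [group]) (lastIndex + 1) [(mask, address, code)]
    else
      aLoop orig rest grouped (lastIndex + 1) (group ++ [(mask, address, code)])

def get_grouped_items_py (items : List (Int × Int × String)) : List (List (Int × Int × String)) :=
  let r := aLoop items items [] (-1) []
  if r.2.isEmpty then r.1 else r.1 ++ [r.2]

-- ===== PORT B =====
-- B: normalize (re-tuple each entry), pass 1 collects the indices i with
-- norm[i][0] != norm[i-1][0], pass 2 slices norm between consecutive edges.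
def get_grouped_items_py_alt (items : List (Int × Int × String)) : List (List (Int × Int × String)) :=
  let norm := items.map (fun (mask, address, code) => (mask, address, code))
  let cuts := (PySem.List.pyRange 1 (norm.length : Int) 1).filter (fun i =>
      (PySem.List.pyGet? norm i).elim false (fun cur =>
        (PySem.List.pyGet? norm (i - 1)).elim false (fun prev => cur.1 != prev.1)))
  let edges := ([(0 : Int)] ++ cuts) ++ [(norm.length : Int)]
  if norm.isEmpty then []
  else (edges.zip (edges.drop 1)).map (fun lohi => PySem.List.slice norm (some lohi.1) (some lohi.2))

-- ===== PRECONDITION & SPEC =====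
def Spec_get_grouped_items_py (items : List (Int × Int × String)) (out : List (List (Int × Int × String))) : Prop := out = get_grouped_items_py_alt items
instance (items : List (Int × Int × String)) (out : List (List (Int × Int × String))) : Decidable (Spec_get_grouped_items_py items out) := by unfold Spec_get_grouped_items_py; infer_instance

-- ===== CLAIM (what is proved, stated in full; the proofs are below) =====
def Claim_equal_get_grouped_items_py : Prop := ∀ (items : List (Int × Int × String)), Dom_get_grouped_items_py items → Spec_get_grouped_items_py items (get_grouped_items_py items)

-- ===== LEMMAS AND PROOFS =====

-- grouping by maximal runs of equal first components (reference function for the proofs)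
def gby : List (Int × Int × String) → List (List (Int × Int × String))
  | [] => []
  | x :: xs =>
    (x :: xs.takeWhile (fun y => y.1 == x.1)) ::
      gby (xs.dropWhile (fun y => y.1 == x.1))
termination_by l => l.length
decreasing_by
  simpa using Nat.lt_succ_of_le (List.length_dropWhile_le _ _)

-- the loop of A, with the back-reference items[last_index] replaced by the previous element
-- carried in the state (none before the first iteration), and A's trailing flush folded in
def bLoop : Option Int → List (Int × Int × String) → List (List (Int × Int × String)) →
    List (Int × Int × String) → List (List (Int × Int × String))
  | _, [], grouped, group => if group.isEmpty then grouped else grouped ++ [group]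
  | prev, (mask, address, code) :: rest, grouped, group =>
    if prev.elim false (fun k => mask != k) then
      bLoop (some mask) rest (grouped ++ [group]) [(mask, address, code)]
    else
      bLoop (some mask) rest grouped (group ++ [(mask, address, code)])

theorem takeWhile_append_all {α : Type} (p : α → Bool) (g r : List α)
    (h : ∀ y ∈ g, p y = true) : (g ++ r).takeWhile p = g ++ r.takeWhile p := by
  induction g with
  | nil => simp
  | cons a g ih => simp_all

theorem dropWhile_append_all {α : Type} (p : α → Bool) (g r : List α)
    (h : ∀ y ∈ g, p y = true) : (g ++ r).dropWhile p = r.dropWhile p := by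
  induction g with
  | nil => simp
  | cons a g ih => simp_all

-- A's loop equals bLoop: after processing the prefix `pre ++ [p]`, last_index points at p
theorem aLoop_eq_bLoop (rest : List (Int × Int × String)) :
    ∀ (pre : List (Int × Int × String)) (p : Int × Int × String)
      (grouped : List (List (Int × Int × String))) (group : List (Int × Int × String)),
    (let r := aLoop (pre ++ p :: rest) rest grouped (pre.length : Int) group;
     if r.2.isEmpty then r.1 else r.1 ++ [r.2])
    = bLoop (some p.1) rest grouped group := by
  induction rest with
  | nil => intro pre p grouped group; simp [aLoop, bLoop]
  | cons x rest ih =>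
    intro pre p grouped group
    obtain ⟨m, a, c⟩ := x
    have hget : PySem.List.pyGet? (pre ++ p :: (m, a, c) :: rest) (pre.length : Int) = some p :=
      PySem.List.pyGet?_append_length _ _ _
    have hpos : decide ((pre.length : Int) > -1) = true := by
      simp only [decide_eq_true_eq]; omega
    have hlen : ((pre.length : Int) + 1) = (((pre ++ [p]).length : Nat) : Int) := by
      simp
    have happ : pre ++ p :: (m, a, c) :: rest = (pre ++ [p]) ++ (m, a, c) :: rest := by simp
    simp only [aLoop, bLoop, hget, Option.elim, hpos, Bool.true_and]
    by_cases hmp : m = p.1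
    · have hb : (m != p.1) = false := by simp [hmp]
      simp only [hb, Bool.false_eq_true, if_false]
      rw [hlen, happ]
      exact ih (pre ++ [p]) (m, a, c) grouped (group ++ [(m, a, c)])
    · have hb : (m != p.1) = true := bne_iff_ne.mpr hmp
      simp only [hb, if_true]
      rw [hlen, happ]
      exact ih (pre ++ [p]) (m, a, c) (grouped ++ [group]) [(m, a, c)]

-- bLoop with a nonempty pending run (all of mask k) equals gby applied to run ++ rest
theorem bLoop_eq_gby (rest : List (Int × Int × String)) :
    ∀ (group : List (Int × Int × String)) (k : Int)
      (grouped : List (List (Int × Int × String))),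
    group ≠ [] → (∀ y ∈ group, y.1 = k) →
    bLoop (some k) rest grouped group = grouped ++ gby (group ++ rest) := by
  induction rest with
  | nil =>
    intro group k grouped hne hall
    obtain ⟨g0, gs, rfl⟩ := List.exists_cons_of_ne_nil hne
    have h0 : g0.1 = k := hall g0 (by simp)
    have htk : gs.takeWhile (fun y => y.1 == g0.1) = gs := by
      have h := takeWhile_append_all (fun y => y.1 == g0.1) gs []
        (fun y hy => by simp [h0, hall y (by simp [hy])])
      simpa using h
    have hdr : gs.dropWhile (fun y => y.1 == g0.1) = [] := by
      have h := dropWhile_append_all (fun y => y.1 == g0.1) gs []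
        (fun y hy => by simp [h0, hall y (by simp [hy])])
      simpa using h
    simp [bLoop, gby, htk, hdr]
  | cons x rest ih =>
    intro group k grouped hne hall
    obtain ⟨m, a, c⟩ := x
    obtain ⟨g0, gs, rfl⟩ := List.exists_cons_of_ne_nil hne
    have h0 : g0.1 = k := hall g0 (by simp)
    by_cases hm : m = k
    · -- same mask: extend the run
      subst hm
      simp only [bLoop, Option.elim, bne_self_eq_false, Bool.false_eq_true, if_false]
      have H := ih (g0 :: (gs ++ [(m, a, c)])) m grouped (by simp)
        (by intro y hy
            rcases List.mem_cons.mp hy with rfl | hy'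
            · exact h0
            · rcases List.mem_append.mp hy' with h | h
              · exact hall y (List.mem_cons_of_mem _ h)
              · simp only [List.mem_singleton] at h
                simp [h])
      simp only [List.cons_append] at H ⊢
      rw [H]
      simp
    · -- new mask: flush the run, start a new one
      have hb : (m != k) = true := bne_iff_ne.mpr hm
      simp only [bLoop, Option.elim, hb, if_true]
      rw [ih [(m, a, c)] m (grouped ++ [g0 :: gs]) (by simp) (by simp)]
      have hall' : ∀ y ∈ gs, ((fun (y : Int × Int × String) => y.1 == g0.1) y) = true := by
        intro y hy; simp [h0, hall y (by simp [hy])]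
      have hx : ((fun (y : Int × Int × String) => y.1 == g0.1) (m, a, c)) = false := by
        simp [h0, hm]
      conv_rhs => rw [show (g0 :: gs) ++ (m, a, c) :: rest = g0 :: (gs ++ (m, a, c) :: rest) by simp]
      rw [gby]
      rw [takeWhile_append_all _ _ _ hall', dropWhile_append_all _ _ _ hall']
      simp [hx]

-- A equals gby
theorem a_eq_gby (items : List (Int × Int × String)) :
    get_grouped_items_py items = gby items := by
  unfold get_grouped_items_py
  match items with
  | [] => simp [aLoop, gby]
  | (m, a, c) :: xs =>
    simp only [aLoop, show decide ((-1 : Int) > -1) = false by decide, Bool.false_and,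
      Bool.false_eq_true, if_false]
    have h1 := aLoop_eq_bLoop xs [] (m, a, c) [] [(m, a, c)]
    have h2 := bLoop_eq_gby xs [(m, a, c)] m [] (by simp) (by simp)
    simp only [List.nil_append] at h1 h2 ⊢
    rw [h2] at h1
    exact h1

-- ---- B equals gby ----

-- the cut predicate of B's first pass
def cutP (l : List (Int × Int × String)) (i : Int) : Bool :=
  (PySem.List.pyGet? l i).elim false (fun cur =>
    (PySem.List.pyGet? l (i - 1)).elim false (fun prev => cur.1 != prev.1))

def altCuts (l : List (Int × Int × String)) : List Int :=
  (PySem.List.pyRange 1 (l.length : Int) 1).filter (cutP l)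

def altEdges (l : List (Int × Int × String)) : List Int :=
  ([(0 : Int)] ++ altCuts l) ++ [(l.length : Int)]

theorem map_retuple (l : List (Int × Int × String)) :
    l.map (fun (mask, address, code) => (mask, address, code)) = l := by
  induction l with
  | nil => rfl
  | cons x xs ih => obtain ⟨m, a, c⟩ := x; simp [ih]

theorem alt_def (l : List (Int × Int × String)) :
    get_grouped_items_py_alt l =
      if l.isEmpty then []
      else ((altEdges l).zip ((altEdges l).drop 1)).map
        (fun lohi => PySem.List.slice l (some lohi.1) (some lohi.2)) := by
  unfold get_grouped_items_py_alt altEdges altCuts cutP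
  rw [map_retuple]


theorem head_dropWhile_false {α : Type} (p : α → Bool) (l : List α) (y : α)
    (h : (l.dropWhile p).head? = some y) : p y = false := by
  induction l with
  | nil => simp [List.dropWhile] at h
  | cons a t ih =>
    by_cases hp : p a
    · rw [List.dropWhile_cons_of_pos hp] at h; exact ih h
    · rw [List.dropWhile_cons_of_neg hp] at h
      simp at h; subst h; simpa using hp

-- inside the left block g, adjacent masks agree, so no cut
theorem cutP_mid (g r : List (Int × Int × String)) (k : Int)
    (hall : ∀ y ∈ g, y.1 = k) (j : Nat) (hj1 : 1 ≤ j) (hj2 : j < g.length) :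
    cutP (g ++ r) (j : Int) = false := by
  have h1 : PySem.List.pyGet? (g ++ r) (j : Int) = some g[j] := by
    rw [PySem.List.pyGet?_natCast]
    rw [List.getElem?_append_left hj2, List.getElem?_eq_getElem hj2]
  have hj3 : j - 1 < g.length := by omega
  have h2 : ((j : Int) - 1) = ((j - 1 : Nat) : Int) := by omega
  have h3 : PySem.List.pyGet? (g ++ r) ((j - 1 : Nat) : Int) = some g[j - 1] := by
    rw [PySem.List.pyGet?_natCast]
    rw [List.getElem?_append_left hj3, List.getElem?_eq_getElem hj3]
  have e1 : (g[j]).1 = k := hall _ (List.getElem_mem hj2)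
  have e2 : (g[j - 1]).1 = k := hall _ (List.getElem_mem hj3)
  simp [cutP, h1, h2, h3, e1, e2]

-- at the boundary index g.length the masks differ, so there is a cut
theorem cutP_boundary (g r' : List (Int × Int × String)) (y : Int × Int × String) (k : Int)
    (hg : g ≠ []) (hall : ∀ z ∈ g, z.1 = k) (hy : y.1 ≠ k) :
    cutP (g ++ y :: r') ((g.length : Nat) : Int) = true := by
  have hm : 1 ≤ g.length := List.length_pos_of_ne_nil hg
  have h1 : PySem.List.pyGet? (g ++ y :: r') ((g.length : Nat) : Int) = some y :=
    PySem.List.pyGet?_append_length _ _ _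
  have hj3 : g.length - 1 < g.length := by omega
  have h2 : (((g.length : Nat) : Int) - 1) = ((g.length - 1 : Nat) : Int) := by omega
  have h3 : PySem.List.pyGet? (g ++ y :: r') ((g.length - 1 : Nat) : Int) = some g[g.length - 1] := by
    rw [PySem.List.pyGet?_natCast]
    rw [List.getElem?_append_left hj3, List.getElem?_eq_getElem hj3]
  have e2 : (g[g.length - 1]).1 = k := hall _ (List.getElem_mem hj3)
  simp [cutP, h2, h3, e2, hy]

-- past the boundary, a cut in g ++ r at g.length + j is a cut in r at j
theorem cutP_shift (g r : List (Int × Int × String)) (j : Nat) (hj : 1 ≤ j) :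
    cutP (g ++ r) ((g.length : Int) + (j : Int)) = cutP r (j : Int) := by
  have h1 : PySem.List.pyGet? (g ++ r) ((g.length : Int) + (j : Int)) = r[j]? := by
    exact_mod_cast PySem.List.pyGet?_append_right g r j
  have h2 : ((g.length : Int) + (j : Int) - 1) = ((g.length : Int) + ((j - 1 : Nat) : Int)) := by
    omega
  have h3 : PySem.List.pyGet? (g ++ r) ((g.length : Int) + ((j - 1 : Nat) : Int)) = r[j - 1]? := by
    exact_mod_cast PySem.List.pyGet?_append_right g r (j - 1)
  have h4 : ((j : Int) - 1) = ((j - 1 : Nat) : Int) := by omega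
  simp [cutP, h1, h2, h3, h4, PySem.List.pyGet?_natCast]

-- shifting a filtered integer range
theorem filter_pyRange_shift (q : Int → Bool) (m a b : Int) :
    (PySem.List.pyRange (a + m) (b + m) 1).filter q
      = ((PySem.List.pyRange a b 1).filter (fun x => q (x + m))).map (· + m) := by
  rw [PySem.List.pyRange_one, PySem.List.pyRange_one]
  have hn : (b + m - (a + m)).toNat = (b - a).toNat := by omega
  rw [hn, List.filter_map, List.filter_map]
  have hp : (q ∘ fun k : Nat => a + m + (k : Int))
      = ((fun x => q (x + m)) ∘ fun k : Nat => a + (k : Int)) := by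
    funext k; simp only [Function.comp]; ring_nf
  rw [hp, List.map_map]
  apply List.map_congr_left
  intro k _
  simp only [Function.comp]
  ring

theorem cuts_append (g r : List (Int × Int × String)) (k : Int)
    (hg : g ≠ []) (hall : ∀ y ∈ g, y.1 = k) (hr : ∀ y, r.head? = some y → y.1 ≠ k) :
    altCuts (g ++ r)
      = if r.isEmpty then []
        else ((g.length : Int) :: (altCuts r).map (· + (g.length : Int))) := by
  have hm : 1 ≤ g.length := List.length_pos_of_ne_nil hg
  unfold altCuts
  have hlen : (((g ++ r).length : Nat) : Int) = (g.length : Int) + (r.length : Int) := by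
    push_cast [List.length_append]; ring
  rw [hlen]
  rw [PySem.List.pyRange_one_append 1 (g.length : Int) _ (by exact_mod_cast hm) (by omega)]
  rw [List.filter_append]
  have h1 : (PySem.List.pyRange 1 (g.length : Int) 1).filter (cutP (g ++ r)) = [] := by
    apply List.filter_eq_nil_iff.mpr
    intro i hi
    rw [PySem.List.mem_pyRange_one] at hi
    obtain ⟨j, rfl⟩ : ∃ j : Nat, i = (j : Int) := ⟨i.toNat, by omega⟩
    simp [cutP_mid g r k hall j (by omega) (by exact_mod_cast hi.2)]
  rw [h1, List.nil_append]
  cases r with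
  | nil =>
    have h0 : ((g.length : Int) + (([] : List (Int × Int × String)).length : Int)) ≤ (g.length : Int) := by
      simp
    rw [PySem.List.pyRange_one_eq_nil h0]
    simp
  | cons y r' =>
    have hy : y.1 ≠ k := hr y rfl
    have hR : (0 : Int) < ((y :: r').length : Int) := by exact_mod_cast List.length_pos_of_ne_nil (by simp)
    rw [PySem.List.pyRange_one_cons (by omega)]
    rw [List.filter_cons_of_pos (by exact cutP_boundary g r' y k hg hall hy)]
    simp only [List.isEmpty_cons, Bool.false_eq_true, if_false]
    congr 1
    have hsh := filter_pyRange_shift (cutP (g ++ y :: r')) (g.length : Int) 1 ((y :: r').length : Int)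
    have harr : PySem.List.pyRange ((g.length : Int) + 1) ((g.length : Int) + ((y :: r').length : Int)) 1
        = PySem.List.pyRange (1 + (g.length : Int)) (((y :: r').length : Int) + (g.length : Int)) 1 := by
      ring_nf
    rw [harr, hsh]
    congr 1
    apply List.filter_congr
    intro x hx
    rw [PySem.List.mem_pyRange_one] at hx
    obtain ⟨j, rfl⟩ : ∃ j : Nat, x = (j : Int) := ⟨x.toNat, by omega⟩
    rw [add_comm ((j : Nat) : Int) (g.length : Int)]
    exact cutP_shift g (y :: r') j (by exact_mod_cast hx.1)

theorem edges_nonneg (l : List (Int × Int × String)) : ∀ x ∈ altEdges l, 0 ≤ x := by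
  intro x hx
  unfold altEdges at hx
  simp only [List.mem_append] at hx
  rcases hx with (hx | hx) | hx
  · simp at hx; omega
  · have := List.mem_of_mem_filter hx
    rw [PySem.List.mem_pyRange_one] at this
    omega
  · simp at hx; subst hx; positivity

theorem slice_shift (g r : List (Int × Int × String)) (a b : Int) (ha : 0 ≤ a) (hb : 0 ≤ b) :
    PySem.List.slice (g ++ r) (some (a + (g.length : Int))) (some (b + (g.length : Int)))
      = PySem.List.slice r (some a) (some b) := by
  rw [PySem.List.slice_toNat (g ++ r) (by omega) (by omega), PySem.List.slice_toNat r ha hb]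
  have h1 : (a + (g.length : Int)).toNat = g.length + a.toNat := by omega
  have h2 : (b + (g.length : Int)).toNat - (a + (g.length : Int)).toNat = b.toNat - a.toNat := by
    omega
  rw [h2, h1]
  congr 1
  simp [List.drop_append]

theorem alt_peel (g r : List (Int × Int × String)) (k : Int)
    (hg : g ≠ []) (hall : ∀ y ∈ g, y.1 = k) (hr : ∀ y, r.head? = some y → y.1 ≠ k) :
    get_grouped_items_py_alt (g ++ r) = g :: get_grouped_items_py_alt r := by
  rw [alt_def (g ++ r), if_neg (by simp [hg])]
  unfold altEdges
  rw [cuts_append g r k hg hall hr]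
  cases r with
  | nil =>
    simp only [List.isEmpty_nil, if_true, List.append_nil]
    have hsl : PySem.List.slice g (some (0 : Int)) (some ((g.length : Nat) : Int)) = g := by
      rw [show ((0 : Int)) = ((0 : Nat) : Int) by simp, PySem.List.slice_natCast]
      simp
    rw [alt_def []]
    simp [List.zip, hsl]
  | cons y r' =>
    simp only [List.isEmpty_cons, Bool.false_eq_true, if_false]
    have hlen2 : (((g ++ y :: r').length : Nat) : Int)
        = (((y :: r').length : Nat) : Int) + (g.length : Int) := by
      push_cast [List.length_append]; ring
    rw [hlen2]
    have hmap : (([(0 : Int)] ++ ((g.length : Int) :: (altCuts (y :: r')).map (· + (g.length : Int))))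
          ++ [(((y :: r').length : Nat) : Int) + (g.length : Int)])
        = (0 : Int) :: (altEdges (y :: r')).map (· + (g.length : Int)) := by
      unfold altEdges
      simp
    rw [hmap]
    -- unfold the head of the mapped edges to expose the zip structure
    have hedge : altEdges (y :: r') = 0 :: (altCuts (y :: r') ++ [(((y :: r').length : Nat) : Int)]) := by
      unfold altEdges; simp
    have hcons : (altEdges (y :: r')).map (· + (g.length : Int))
        = ((0 : Int) + (g.length : Int)) ::
            (altCuts (y :: r') ++ [(((y :: r').length : Nat) : Int)]).map (· + (g.length : Int)) := by
      rw [hedge]; simp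
    -- pairs of a mapped list are the mapped pairs
    have hzipmap : (((altEdges (y :: r')).map (· + (g.length : Int))).zip
          (((altEdges (y :: r')).map (· + (g.length : Int))).drop 1))
        = ((altEdges (y :: r')).zip ((altEdges (y :: r')).drop 1)).map
            (Prod.map (· + (g.length : Int)) (· + (g.length : Int))) := by
      rw [← List.map_drop, List.zip_map]
    have hpair : (((0 : Int) :: (altEdges (y :: r')).map (· + (g.length : Int))).zip
          ((((0 : Int) :: (altEdges (y :: r')).map (· + (g.length : Int)))).drop 1))
        = ((0 : Int), (0 : Int) + (g.length : Int)) ::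
            (((altEdges (y :: r')).zip ((altEdges (y :: r')).drop 1)).map
              (Prod.map (· + (g.length : Int)) (· + (g.length : Int)))) := by
      rw [List.drop_one, List.tail_cons, ← hzipmap, hcons]
      simp [List.zip_cons_cons]
    rw [hpair]
    rw [List.map_cons, List.map_map]
    congr 1
    · -- head slice is g
      have : (0 : Int) + (g.length : Int) = ((g.length : Nat) : Int) := by simp
      rw [this]
      rw [show ((0 : Int)) = ((0 : Nat) : Int) by simp, PySem.List.slice_natCast]
      simp
    · -- tail slices are the slices of r
      rw [alt_def (y :: r'), if_neg (by simp)]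
      apply List.map_congr_left
      intro p hp
      have hp1 : p.1 ∈ altEdges (y :: r') := (List.of_mem_zip hp).1
      have hp2 : p.2 ∈ altEdges (y :: r') :=
        List.mem_of_mem_drop (List.of_mem_zip hp).2
      have h1 := edges_nonneg _ _ hp1
      have h2 := edges_nonneg _ _ hp2
      simp only [Function.comp, Prod.map]
      exact slice_shift g (y :: r') p.1 p.2 h1 h2

theorem alt_eq_gby (l : List (Int × Int × String)) :
    get_grouped_items_py_alt l = gby l := by
  induction l using gby.induct with
  | case1 => rw [alt_def]; simp [gby]
  | case2 x xs ih =>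
    have hl : x :: xs = (x :: xs.takeWhile (fun y => y.1 == x.1))
        ++ xs.dropWhile (fun y => y.1 == x.1) := by
      rw [List.cons_append, List.takeWhile_append_dropWhile]
    rw [gby]
    conv_lhs => rw [hl]
    rw [alt_peel _ _ x.1 (by simp)
      (by intro y hy
          rcases List.mem_cons.mp hy with rfl | hy'
          · rfl
          · have hpy := List.mem_takeWhile_imp
              (p := fun (z : Int × Int × String) => z.1 == x.1) hy'
            exact beq_iff_eq.mp hpy)
      (by intro y hy
          have := head_dropWhile_false _ _ _ hy
          simpa using this)]
    rw [ih]

-- ===== VERDICT (by name: the statement is the Claim_ definition above) =====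
theorem get_grouped_items_py_spec : Claim_equal_get_grouped_items_py := by
  intro items _
  unfold Spec_get_grouped_items_py
  rw [a_eq_gby, alt_eq_gby]
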